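-- pv_equiv track=rewrite | github.com/poojamalviya/ds-algo | flipZero.py | bfflipZero
-- ===== SOURCE A (Python) =====
-- def bfflipZero(arr):
--     res = 0
--     maxOne = 0
--     for i in range(0, len(arr)-1):
--         if arr[i] == 0:
--             res += 1
--         if arr[i] == 1:
--             temp = 0
--             for j in range(i, len(arr)-1):
--                 if arr[j] == 1:
--                     temp += 1
--             maxOne = max(maxOne, temp)
--
--     return res + maxOne
-- ===== SOURCE B (Python) =====
-- def bfflipZero(arr):
--     # one pass: every 0 and every 1 in arr[:-1] contributes exactly 1 (max suffix ones-count = total ones)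
--     return sum(1 for x in arr[:-1] if x == 0 or x == 1)
-- ===== Notes on version B (the rewrite author's own statement) =====
-- stated objective: simpler
-- what changed: Replaced the nested loops (re-counting ones of each suffix to take a running max) by a single counting pass: the max suffix-count of ones is just the total number of ones in arr[:-1], so the result is the count of elements of arr[:-1] equal to 0 or 1.
import Mathlib
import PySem

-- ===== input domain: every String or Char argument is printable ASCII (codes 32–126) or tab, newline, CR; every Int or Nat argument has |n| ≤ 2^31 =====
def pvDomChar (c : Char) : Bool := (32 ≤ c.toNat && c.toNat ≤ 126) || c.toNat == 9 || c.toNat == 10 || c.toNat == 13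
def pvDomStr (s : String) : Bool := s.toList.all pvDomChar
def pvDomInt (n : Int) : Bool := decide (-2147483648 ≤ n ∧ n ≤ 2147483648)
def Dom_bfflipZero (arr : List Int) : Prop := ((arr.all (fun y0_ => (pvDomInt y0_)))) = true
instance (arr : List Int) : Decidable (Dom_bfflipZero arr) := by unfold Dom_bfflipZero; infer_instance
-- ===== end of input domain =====

-- B replaces A's nested loops by a single pass counting the 0s and 1s of arr[:-1]
-- (the max suffix-count of ones equals the total count of ones): simpler, one line.


-- ===== PORT A =====
def bfflipZero (arr : List Int) : Int :=
  let st := (PySem.List.pyRange 0 (PySem.List.len arr - 1) 1).foldl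
    (fun (st : Int × Int) i =>
      let res := if PySem.List.pyGetD arr i 0 == 0 then st.1 + 1 else st.1
      let maxOne :=
        if PySem.List.pyGetD arr i 0 == 1 then
          max st.2 ((PySem.List.pyRange i (PySem.List.len arr - 1) 1).foldl
            (fun temp j => if PySem.List.pyGetD arr j 0 == 1 then temp + 1 else temp) 0)
        else st.2
      (res, maxOne)) ((0 : Int), (0 : Int))
  st.1 + st.2

-- ===== PORT B =====
-- arr[:-1] is arr.dropLast; the 0/1-sum over the filtered pass is countP
def bfflipZero_alt (arr : List Int) : Int :=
  ((arr.dropLast.countP (fun x => x == 0 || x == 1) : Nat) : Int)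

-- ===== PRECONDITION & SPEC =====
def Spec_bfflipZero (arr : List Int) (out : Int) : Prop := out = bfflipZero_alt arr
instance (arr : List Int) (out : Int) : Decidable (Spec_bfflipZero arr out) := by unfold Spec_bfflipZero; infer_instance

-- ===== CLAIM (what is proved, stated in full; the proofs are below) =====
def Claim_equal_bfflipZero : Prop := ∀ (arr : List Int), Dom_bfflipZero arr → Spec_bfflipZero arr (bfflipZero arr)

-- ===== LEMMAS AND PROOFS =====

-- the maxOne accumulator's final contribution over a list
def pvMaxOnes (M : List Int) : Int := if M.any (· == 1) then ((M.countP (· == 1) : Nat) : Int) else 0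

-- structural form of A's outer loop over the suffix still to be scanned
def pvG : List Int → Int × Int → Int × Int
  | [], s => s
  | x :: M, s =>
      pvG M (if x == 0 then s.1 + 1 else s.1,
             if x == 1 then max s.2 (((x :: M).countP (· == 1) : Nat) : Int) else s.2)

lemma pvMaxOnes_nonneg (M : List Int) : 0 ≤ pvMaxOnes M := by
  unfold pvMaxOnes; split <;> positivity

lemma pvMaxOnes_le_count (M : List Int) : pvMaxOnes M ≤ ((M.countP (· == 1) : Nat) : Int) := by
  unfold pvMaxOnes; split <;> simp

lemma pvG_spec (M : List Int) : ∀ res mx : Int, 0 ≤ mx →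
    pvG M (res, mx) = (res + ((M.countP (· == 0) : Nat) : Int), max mx (pvMaxOnes M)) := by
  induction M with
  | nil =>
      intro res mx hmx
      refine Prod.ext ?_ ?_ <;> simp [pvG, pvMaxOnes]
      omega
  | cons x M ih =>
      intro res mx hmx
      simp only [pvG]
      rw [ih _ _ (by split <;> omega)]
      have hle := pvMaxOnes_le_count M
      by_cases hx1 : x = 1
      · have hA : pvMaxOnes (x :: M) = ((M.countP (· == 1) : Nat) : Int) + 1 := by
          subst hx1; simp [pvMaxOnes]
        subst hx1
        refine Prod.ext ?_ ?_
        · simp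
        · simp [hA]
          omega
      · have hA : pvMaxOnes (x :: M) = pvMaxOnes M := by
          simp [pvMaxOnes, hx1]
        refine Prod.ext ?_ ?_
        · by_cases hx0 : x = 0 <;> simp [hx0]
          ring
        · simp [hx1, hA]

lemma pv_inner (L : List Int) (i : Int) (hi : 0 ≤ i) :
    (PySem.List.pyRange i ((L.length : Int)) 1).foldl
      (fun temp j => if PySem.List.pyGetD L j 0 == 1 then temp + 1 else temp) 0
    = (((L.drop i.toNat).countP (· == 1) : Nat) : Int) := by
  rw [PySem.List.foldl_pyRange_pyGetD' L 0 (fun temp x => if x == 1 then temp + 1 else temp) 0 hi,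
      PySem.List.foldl_count_if]
  simp

lemma pv_outer (L : List Int) : ∀ (a : Nat) (s : Int × Int), a ≤ L.length →
    List.foldl
      (fun (st : Int × Int) i =>
        (if PySem.List.pyGetD L i 0 == 0 then st.1 + 1 else st.1,
         if PySem.List.pyGetD L i 0 == 1 then
           max st.2 (List.foldl
             (fun temp j => if PySem.List.pyGetD L j 0 == 1 then temp + 1 else temp) 0
             (PySem.List.pyRange i ((L.length : Int)) 1))
         else st.2)) s
      (PySem.List.pyRange (a : Int) ((L.length : Int)) 1)
    = pvG (L.drop a) s := by
  intro a s ha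
  induction h : L.length - a generalizing a s with
  | zero =>
      have haL : a = L.length := by omega
      rw [PySem.List.pyRange_one_eq_nil (by omega)]
      rw [haL, List.drop_length]
      rfl
  | succ n ih =>
      have haL : a < L.length := by omega
      rw [PySem.List.pyRange_one_cons (by exact_mod_cast haL)]
      rw [List.foldl_cons]
      have hget : PySem.List.pyGetD L (a : Int) 0 = L[a] := by
        rw [PySem.List.pyGetD_natCast, List.getD_eq_getElem?_getD, List.getElem?_eq_getElem haL]
        rfl
      have hdrop : L.drop a = L[a] :: L.drop (a + 1) := List.drop_eq_getElem_cons haL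
      have hstep := ih (a + 1)
        ((if PySem.List.pyGetD L (a : Int) 0 == 0 then s.1 + 1 else s.1,
          if PySem.List.pyGetD L (a : Int) 0 == 1 then
            max s.2 (List.foldl
              (fun temp j => if PySem.List.pyGetD L j 0 == 1 then temp + 1 else temp) 0
              (PySem.List.pyRange ((a : Int)) ((L.length : Int)) 1))
          else s.2))
        (by omega) (by omega)
      push_cast at hstep
      rw [hstep, hdrop]
      simp only [pvG]
      congr 1
      rw [hget, pv_inner L (a : Int) (by positivity), Int.toNat_natCast, hdrop]

lemma pv_getD_concat (L : List Int) (x : Int) (i : Int) (h0 : 0 ≤ i) (h1 : i < (L.length : Int)) :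
    PySem.List.pyGetD (L ++ [x]) i 0 = PySem.List.pyGetD L i 0 := by
  obtain ⟨n, rfl⟩ : ∃ n : Nat, i = (n : Int) := ⟨i.toNat, (Int.toNat_of_nonneg h0).symm⟩
  rw [PySem.List.pyGetD_natCast, PySem.List.pyGetD_natCast]
  have hn : n < L.length := by exact_mod_cast h1
  rw [List.getD_eq_getElem?_getD, List.getD_eq_getElem?_getD, List.getElem?_append_left hn]

lemma pv_countP_or (L : List Int) :
    L.countP (fun x => x == 0 || x == 1) = L.countP (· == 0) + L.countP (· == 1) := by
  induction L with
  | nil => simp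
  | cons x M ih =>
      simp only [List.countP_cons, ih]
      by_cases h0 : x = 0 <;> by_cases h1 : x = 1 <;> simp [h0, h1] <;> omega

lemma pv_main (arr : List Int) : bfflipZero arr = bfflipZero_alt arr := by
  rcases List.eq_nil_or_concat arr with rfl | ⟨L, x, rfl⟩
  · rfl
  · simp only [bfflipZero, bfflipZero_alt, PySem.List.len_eq, List.concat_eq_append]
    have hlen : (((L ++ [x]).length : Nat) : Int) - 1 = ((L.length : Nat) : Int) := by simp
    simp only [hlen]
    have hcong : ∀ i ∈ PySem.List.pyRange (0 : Int) ((L.length : Int)) 1, ∀ st : Int × Int,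
        ((if PySem.List.pyGetD (L ++ [x]) i 0 == 0 then st.1 + 1 else st.1,
          if PySem.List.pyGetD (L ++ [x]) i 0 == 1 then
            max st.2 (List.foldl
              (fun temp j => if PySem.List.pyGetD (L ++ [x]) j 0 == 1 then temp + 1 else temp) 0
              (PySem.List.pyRange i ((L.length : Int)) 1))
          else st.2) : Int × Int)
        = (if PySem.List.pyGetD L i 0 == 0 then st.1 + 1 else st.1,
           if PySem.List.pyGetD L i 0 == 1 then
             max st.2 (List.foldl
               (fun temp j => if PySem.List.pyGetD L j 0 == 1 then temp + 1 else temp) 0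
               (PySem.List.pyRange i ((L.length : Int)) 1))
           else st.2) := by
      intro i hi st
      rw [PySem.List.mem_pyRange_one] at hi
      rw [pv_getD_concat L x i hi.1 hi.2]
      rw [PySem.List.foldl_congr_mem' _ _
        (fun temp j => if PySem.List.pyGetD L j 0 == 1 then temp + 1 else temp) 0 ?_]
      intro j hj temp
      rw [PySem.List.mem_pyRange_one] at hj
      rw [pv_getD_concat L x j (le_trans hi.1 hj.1) hj.2]
    rw [PySem.List.foldl_congr_mem' _ _ _ ((0 : Int), (0 : Int)) hcong]
    have h0 := pv_outer L 0 ((0 : Int), (0 : Int)) (Nat.zero_le _)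
    simp only [Int.natCast_zero] at h0
    rw [h0, List.drop_zero, pvG_spec L 0 0 le_rfl]
    have hm0 := pvMaxOnes_nonneg L
    have hle := pvMaxOnes_le_count L
    simp only [List.dropLast_concat]
    rw [pv_countP_or]
    show 0 + ((L.countP (· == 0) : Nat) : Int) + max 0 (pvMaxOnes L)
      = ((L.countP (· == 0) + L.countP (· == 1) : Nat) : Int)
    unfold pvMaxOnes
    split
    · push_cast
      omega
    · rename_i h
      have hz : L.countP (· == 1) = 0 := by
        rw [List.countP_eq_zero]
        intro y hy
        simp only [List.any_eq_true, not_exists] at h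
        exact fun hc => h y ⟨hy, hc⟩
      rw [hz]
      push_cast
      omega

-- ===== VERDICT (by name: the statement is the Claim_ definition above) =====
theorem bfflipZero_spec : Claim_equal_bfflipZero := by
  intro arr _
  unfold Spec_bfflipZero
  exact pv_main arr
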